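-- pv_equiv track=rewrite | github.com/texpress30/scripts | apps/backend/app/services/team_members.py | _normalize_allowed_subaccount_ids
-- ===== SOURCE A (Python) =====
-- def _normalize_allowed_subaccount_ids(value: list[int] | tuple[int, ...] | None) -> list[int]:
--     if value is None:
--         return []
--     normalized: list[int] = []
--     for raw in value:
--         try:
--             numeric = int(raw)
--         except Exception:  # noqa: BLE001
--             continue
--         if numeric <= 0:
--             continue
--         if numeric not in normalized:
--             normalized.append(numeric)
--     return sorted(normalized)
-- ===== SOURCE B (Python) =====
-- def _normalize_allowed_subaccount_ids(value):
--     if value is None: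
--         return []
--     kept = []
--     for raw in value:
--         try:
--             numeric = int(raw)
--         except Exception:  # noqa: BLE001
--             continue
--         if numeric > 0:
--             kept.append(numeric)
--     kept.sort()
--     result = []
--     for x in kept:
--         if not result or result[-1] != x:
--             result.append(x)
--     return result
-- ===== Notes on version B (the rewrite author's own statement) =====
-- stated objective: faster
-- what changed: Instead of deduplicating with a linear membership scan on every append and sorting the deduped list, B appends every positive value, sorts once, and removes duplicates in one pass over the sorted list by comparing each element to the previously kept one.
import Mathlib
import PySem

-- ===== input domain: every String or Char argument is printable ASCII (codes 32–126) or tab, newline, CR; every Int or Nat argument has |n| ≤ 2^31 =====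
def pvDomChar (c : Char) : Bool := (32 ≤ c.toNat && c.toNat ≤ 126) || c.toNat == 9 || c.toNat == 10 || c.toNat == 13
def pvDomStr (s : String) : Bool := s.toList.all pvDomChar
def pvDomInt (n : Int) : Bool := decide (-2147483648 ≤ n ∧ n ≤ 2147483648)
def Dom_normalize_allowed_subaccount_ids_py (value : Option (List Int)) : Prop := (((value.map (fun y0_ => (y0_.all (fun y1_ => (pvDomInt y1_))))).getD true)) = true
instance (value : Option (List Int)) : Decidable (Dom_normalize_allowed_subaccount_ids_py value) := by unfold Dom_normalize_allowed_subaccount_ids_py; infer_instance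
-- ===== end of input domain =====

-- B sorts all positive values once and drops duplicates in a single adjacent-comparison pass,
-- instead of A's linear membership scan before every append (objective: faster, asymptotic).

-- ===== PORT A =====
def normalize_allowed_subaccount_ids_py (value : Option (List Int)) : List Int :=
  match value with
  | none => []
  | some v =>
    -- for raw in value: numeric = int(raw) (identity on int, never raises); skip ≤ 0; dedup-append
    let normalized := v.foldl (fun acc raw =>
      if raw ≤ 0 then acc
      else if raw ∈ acc then acc else acc ++ [raw]) ([] : List Int)
    PySem.List.sorted normalized (fun x => x) false

-- ===== PORT B =====
def normalize_allowed_subaccount_ids_py_alt (value : Option (List Int)) : List Int :=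
  match value with
  | none => []
  | some v =>
    -- keep every positive value, sort, then adjacent-dedup
    let kept := v.foldl (fun acc raw => if raw > 0 then acc ++ [raw] else acc) ([] : List Int)
    (PySem.List.sorted kept (fun x => x) false).foldl
      (fun res x => if res.getLast? = some x then res else res ++ [x]) ([] : List Int)

-- ===== PRECONDITION & SPEC =====
def Spec_normalize_allowed_subaccount_ids_py (value : Option (List Int)) (out : List Int) : Prop := out = normalize_allowed_subaccount_ids_py_alt value
instance (value : Option (List Int)) (out : List Int) : Decidable (Spec_normalize_allowed_subaccount_ids_py value out) := by unfold Spec_normalize_allowed_subaccount_ids_py; infer_instance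

-- ===== CLAIM (what is proved, stated in full; the proofs are below) =====
def Claim_equal_normalize_allowed_subaccount_ids_py : Prop := ∀ (value : Option (List Int)), Dom_normalize_allowed_subaccount_ids_py value → Spec_normalize_allowed_subaccount_ids_py value (normalize_allowed_subaccount_ids_py value)

-- ===== LEMMAS AND PROOFS =====

theorem pv_mem_foldA (v : List Int) (acc : List Int) (x : Int) :
    x ∈ v.foldl (fun acc raw => if raw ≤ 0 then acc else if raw ∈ acc then acc else acc ++ [raw]) acc
      ↔ x ∈ acc ∨ (x ∈ v ∧ 0 < x) := by
  induction v generalizing acc with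
  | nil => simp
  | cons h t ih =>
    simp only [List.foldl_cons]
    by_cases h1 : h ≤ 0
    · simp only [if_pos h1, ih]
      constructor
      · rintro (hx | ⟨hx, hp⟩)
        · exact Or.inl hx
        · exact Or.inr ⟨List.mem_cons_of_mem _ hx, hp⟩
      · rintro (hx | ⟨hx, hp⟩)
        · exact Or.inl hx
        · rcases List.mem_cons.1 hx with rfl | hx
          · omega
          · exact Or.inr ⟨hx, hp⟩
    · by_cases h2 : h ∈ acc
      · simp only [if_neg h1, if_pos h2, ih]
        constructor
        · rintro (hx | ⟨hx, hp⟩)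
          · exact Or.inl hx
          · exact Or.inr ⟨List.mem_cons_of_mem _ hx, hp⟩
        · rintro (hx | ⟨hx, hp⟩)
          · exact Or.inl hx
          · rcases List.mem_cons.1 hx with rfl | hx
            · exact Or.inl h2
            · exact Or.inr ⟨hx, hp⟩
      · simp only [if_neg h1, if_neg h2, ih, List.mem_append, List.mem_singleton]
        constructor
        · rintro ((hx | rfl) | ⟨hx, hp⟩)
          · exact Or.inl hx
          · exact Or.inr ⟨List.mem_cons_self, by omega⟩
          · exact Or.inr ⟨List.mem_cons_of_mem _ hx, hp⟩
        · rintro (hx | ⟨hx, hp⟩)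
          · exact Or.inl (Or.inl hx)
          · rcases List.mem_cons.1 hx with rfl | hx
            · exact Or.inl (Or.inr rfl)
            · exact Or.inr ⟨hx, hp⟩

theorem pv_nodup_foldA (v : List Int) (acc : List Int) (hacc : acc.Nodup) :
    (v.foldl (fun acc raw => if raw ≤ 0 then acc else if raw ∈ acc then acc else acc ++ [raw]) acc).Nodup := by
  induction v generalizing acc with
  | nil => simpa
  | cons h t ih =>
    simp only [List.foldl_cons]
    by_cases h1 : h ≤ 0
    · simp only [if_pos h1]; exact ih acc hacc
    · by_cases h2 : h ∈ acc
      · simp only [if_neg h1, if_pos h2]; exact ih acc hacc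
      · simp only [if_neg h1, if_neg h2]
        refine ih _ ?_
        refine List.Nodup.append hacc (List.nodup_singleton _) ?_
        intro a ha hb
        rw [List.mem_singleton] at hb
        exact h2 (hb ▸ ha)

theorem pv_mem_foldK (v : List Int) (acc : List Int) (x : Int) :
    x ∈ v.foldl (fun acc raw => if raw > 0 then acc ++ [raw] else acc) acc
      ↔ x ∈ acc ∨ (x ∈ v ∧ 0 < x) := by
  induction v generalizing acc with
  | nil => simp
  | cons h t ih =>
    simp only [List.foldl_cons]
    by_cases h1 : h > 0
    · simp only [if_pos h1, ih, List.mem_append, List.mem_singleton]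
      constructor
      · rintro ((hx | rfl) | ⟨hx, hp⟩)
        · exact Or.inl hx
        · exact Or.inr ⟨List.mem_cons_self, h1⟩
        · exact Or.inr ⟨List.mem_cons_of_mem _ hx, hp⟩
      · rintro (hx | ⟨hx, hp⟩)
        · exact Or.inl (Or.inl hx)
        · rcases List.mem_cons.1 hx with rfl | hx
          · exact Or.inl (Or.inr rfl)
          · exact Or.inr ⟨hx, hp⟩
    · simp only [if_neg h1, ih]
      constructor
      · rintro (hx | ⟨hx, hp⟩)
        · exact Or.inl hx
        · exact Or.inr ⟨List.mem_cons_of_mem _ hx, hp⟩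
      · rintro (hx | ⟨hx, hp⟩)
        · exact Or.inl hx
        · rcases List.mem_cons.1 hx with rfl | hx
          · omega
          · exact Or.inr ⟨hx, hp⟩

theorem pv_mem_foldD (l : List Int) (res : List Int) (x : Int) :
    x ∈ l.foldl (fun res x => if res.getLast? = some x then res else res ++ [x]) res
      ↔ x ∈ res ∨ x ∈ l := by
  induction l generalizing res with
  | nil => simp
  | cons h t ih =>
    simp only [List.foldl_cons]
    by_cases h1 : res.getLast? = some h
    · have hmem : h ∈ res := List.mem_of_getLast? h1
      simp only [if_pos h1, ih]
      constructor
      · rintro (hx | hx)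
        · exact Or.inl hx
        · exact Or.inr (List.mem_cons_of_mem _ hx)
      · rintro (hx | hx)
        · exact Or.inl hx
        · rcases List.mem_cons.1 hx with rfl | hx
          · exact Or.inl hmem
          · exact Or.inr hx
    · simp only [if_neg h1, ih, List.mem_append, List.mem_singleton]
      constructor
      · rintro ((hx | rfl) | hx)
        · exact Or.inl hx
        · exact Or.inr List.mem_cons_self
        · exact Or.inr (List.mem_cons_of_mem _ hx)
      · rintro (hx | hx)
        · exact Or.inl (Or.inl hx)
        · rcases List.mem_cons.1 hx with rfl | hx
          · exact Or.inl (Or.inr rfl)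
          · exact Or.inr hx

-- in a strictly increasing list, an element that bounds all others is the last one
theorem pv_getLast?_of_max (res : List Int) (x : Int)
    (hp : res.Pairwise (· < ·)) (hx : x ∈ res) (hmax : ∀ a ∈ res, a ≤ x) :
    res.getLast? = some x := by
  induction res with
  | nil => cases hx
  | cons r rs ih =>
    rcases List.pairwise_cons.1 hp with ⟨hr, hrs⟩
    rcases List.mem_cons.1 hx with rfl | hx
    · have : rs = [] := by
        cases rs with
        | nil => rfl
        | cons b bs =>
          have h1 : x < b := hr b List.mem_cons_self
          have h2 : b ≤ x := hmax b (List.mem_cons_of_mem _ List.mem_cons_self)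
          omega
      subst this; rfl
    · cases rs with
      | nil => cases hx
      | cons b bs =>
        rw [List.getLast?_cons_cons]
        exact ih hrs hx (fun a ha => hmax a (List.mem_cons_of_mem _ ha))

theorem pv_pairwise_foldD (l : List Int) (res : List Int)
    (hl : l.Pairwise (· ≤ ·)) (hres : res.Pairwise (· < ·))
    (hbound : ∀ a ∈ res, ∀ b ∈ l, a ≤ b) :
    (l.foldl (fun res x => if res.getLast? = some x then res else res ++ [x]) res).Pairwise (· < ·) := by
  induction l generalizing res with
  | nil => simpa
  | cons h t ih =>
    rcases List.pairwise_cons.1 hl with ⟨hh, ht⟩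
    simp only [List.foldl_cons]
    by_cases h1 : res.getLast? = some h
    · simp only [if_pos h1]
      exact ih res ht hres (fun a ha b hb => le_trans (hbound a ha h List.mem_cons_self) (hh b hb))
    · simp only [if_neg h1]
      have hlt : ∀ a ∈ res, a < h := by
        intro a ha
        have hle := hbound a ha h List.mem_cons_self
        rcases lt_or_eq_of_le hle with hlt | rfl
        · exact hlt
        · exact absurd (pv_getLast?_of_max res a hres ha
            (fun b hb => hbound b hb a List.mem_cons_self)) h1
      refine ih _ ht ?_ ?_
      · refine List.pairwise_append.2 ⟨hres, List.pairwise_singleton _ _, ?_⟩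
        intro a ha b hb
        rw [List.mem_singleton] at hb; subst hb
        exact hlt a ha
      · intro a ha b hb
        rcases List.mem_append.1 ha with ha | ha
        · exact le_trans (hlt a ha).le (hh b hb)
        · rw [List.mem_singleton] at ha; subst ha
          exact hh b hb

theorem normalize_strict_eq (l1 l2 : List Int)
    (h1 : l1.Pairwise (· < ·)) (h2 : l2.Pairwise (· < ·))
    (hmem : ∀ x, x ∈ l1 ↔ x ∈ l2) : l1 = l2 := by
  have hn1 : l1.Nodup := h1.imp ne_of_lt
  have hn2 : l2.Nodup := h2.imp ne_of_lt
  have hperm : l1.Perm l2 := (List.perm_ext_iff_of_nodup hn1 hn2).2 hmem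
  exact List.Perm.eq_of_pairwise (fun a b _ _ hab hba => by omega) h1 h2 hperm

-- ===== VERDICT (by name: the statement is the Claim_ definition above) =====
theorem normalize_allowed_subaccount_ids_py_spec : Claim_equal_normalize_allowed_subaccount_ids_py := by
  intro value _
  unfold Spec_normalize_allowed_subaccount_ids_py
  match value with
  | none => rfl
  | some v =>
    simp only [normalize_allowed_subaccount_ids_py, normalize_allowed_subaccount_ids_py_alt]
    set na := v.foldl (fun acc raw => if raw ≤ 0 then acc else if raw ∈ acc then acc else acc ++ [raw]) ([] : List Int) with hna
    set kept := v.foldl (fun acc raw => if raw > 0 then acc ++ [raw] else acc) ([] : List Int) with hkept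
    -- A side: sorted na is strictly increasing
    have hAperm : (PySem.List.sorted na (fun x => x) false).Perm na := PySem.List.sorted_perm na (fun x => x) false
    have hAnodup : (PySem.List.sorted na (fun x => x) false).Nodup :=
      hAperm.nodup_iff.2 (pv_nodup_foldA v [] List.nodup_nil)
    have hAle : (PySem.List.sorted na (fun x => x) false).Pairwise (· ≤ ·) := by
      have := PySem.List.sorted_pairwise (xs := na) (key := fun x => x)
      simpa using this
    have hApw : (PySem.List.sorted na (fun x => x) false).Pairwise (· < ·) :=
      (hAle.and hAnodup).imp (fun h => lt_of_le_of_ne h.1 h.2)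
    -- B side: the adjacent dedup of sorted kept is strictly increasing
    have hKle : (PySem.List.sorted kept (fun x => x) false).Pairwise (· ≤ ·) := by
      have := PySem.List.sorted_pairwise (xs := kept) (key := fun x => x)
      simpa using this
    have hBpw := pv_pairwise_foldD (PySem.List.sorted kept (fun x => x) false) []
      hKle List.Pairwise.nil (by simp)
    -- same membership on both sides
    refine normalize_strict_eq _ _ hApw hBpw ?_
    intro x
    rw [PySem.List.mem_sorted, pv_mem_foldD, PySem.List.mem_sorted]
    rw [hna] at *
    rw [pv_mem_foldA, pv_mem_foldK]
    simp
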